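-- pv_equiv track=rewrite | github.com/abdulaziz7225/leetcode-problems | binary-search/medium/1838.frequency_of_the_most_frequent_element.py | check
-- ===== SOURCE A (Python) =====
-- from typing import List
--
-- def check(array: List[int], prefix: List[int], idx: int, k: int) -> int:
--     left = 0
--     right = idx
--     target = array[idx]
--     best = idx
--
--     while left <= right:
--         middle = (left + right) // 2
--         count = idx - middle + 1
--
--         final_sum = count * target
--         original_sum = prefix[idx] - prefix[middle] + array[middle]
--         operations_required = final_sum - original_sum
--
--         if operations_required > k:
--             left = middle + 1
--         else:
--             best = middle
--             right = middle - 1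
--
--     return idx - best + 1
-- ===== SOURCE B (Python) =====
-- from typing import List, Optional
--
-- def check(array: List[int], prefix: List[int], idx: int, k: int) -> int:
--     target = array[idx]
--
--     def cost(m: int) -> int:
--         return (idx - m + 1) * target - (prefix[idx] - prefix[m] + array[m])
--
--     def descend(lo: int, hi: int) -> Optional[int]:
--         # leftmost middle on the binary-search path whose cost fits in k
--         if lo > hi:
--             return None
--         m = (lo + hi) // 2
--         if cost(m) > k:
--             return descend(m + 1, hi)
--         r = descend(lo, m - 1)
--         return m if r is None else r
--
--     b = descend(0, idx)
--     best = idx if b is None else b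
--     return idx - best + 1
-- ===== Notes on version B (the rewrite author's own statement) =====
-- stated objective: alternative
-- what changed: The imperative while-loop with mutable left/right/best state is replaced by a pure recursive binary-search descent that returns Optional[int] (the leftmost accepted midpoint on the path) and needs no best accumulator.
import Mathlib
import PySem

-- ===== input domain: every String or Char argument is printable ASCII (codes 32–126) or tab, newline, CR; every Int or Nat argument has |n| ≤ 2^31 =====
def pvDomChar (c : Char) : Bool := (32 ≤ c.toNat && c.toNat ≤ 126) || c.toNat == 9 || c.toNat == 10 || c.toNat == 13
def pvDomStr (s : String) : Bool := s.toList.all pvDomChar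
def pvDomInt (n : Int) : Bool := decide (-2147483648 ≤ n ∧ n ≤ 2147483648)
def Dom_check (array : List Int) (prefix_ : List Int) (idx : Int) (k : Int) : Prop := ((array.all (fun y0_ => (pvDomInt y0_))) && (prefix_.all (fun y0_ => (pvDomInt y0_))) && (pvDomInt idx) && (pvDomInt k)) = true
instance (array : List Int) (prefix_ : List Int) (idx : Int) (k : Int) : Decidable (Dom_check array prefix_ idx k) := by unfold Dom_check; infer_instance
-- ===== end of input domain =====

-- B replaces A's imperative binary-search loop (mutable left/right/best) by a pure
-- recursive descent returning Option Int; same search path, no accumulator state.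

-- termination measures for both ports' binary searches (cited by decreasing_by; proofs kept
-- out of the port bodies)
theorem pvMidDecRight {lo hi : Int} (h : lo ≤ hi) :
    (hi - (PySem.Int.floordiv (lo + hi) 2 + 1) + 1).toNat < (hi - lo + 1).toNat := by
  have hb := PySem.Int.floordiv_two_mid_bounds h
  omega

theorem pvMidDecLeft {lo hi : Int} (h : lo ≤ hi) :
    (PySem.Int.floordiv (lo + hi) 2 - 1 - lo + 1).toNat < (hi - lo + 1).toNat := by
  have hb := PySem.Int.floordiv_two_mid_bounds h
  omega

-- ===== PORT A =====
-- A's while loop, state (left, right, best); list accesses via pyGet? (getD 0 only outside Pre_)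
def checkLoop (array prefix_ : List Int) (idx target k : Int) (left right best : Int) : Int :=
  if _h : left ≤ right then
    let middle := PySem.Int.floordiv (left + right) 2
    let count := idx - middle + 1
    let final_sum := count * target
    let original_sum := (PySem.List.pyGet? prefix_ idx).getD 0 - (PySem.List.pyGet? prefix_ middle).getD 0
      + (PySem.List.pyGet? array middle).getD 0
    if final_sum - original_sum > k then
      checkLoop array prefix_ idx target k (middle + 1) right best
    else
      checkLoop array prefix_ idx target k left (middle - 1) middle
  else
    idx - best + 1
termination_by (right - left + 1).toNat
decreasing_by
  · exact pvMidDecRight _h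
  · exact pvMidDecLeft _h

def check (array : List Int) (prefix_ : List Int) (idx : Int) (k : Int) : Int :=
  checkLoop array prefix_ idx ((PySem.List.pyGet? array idx).getD 0) k 0 idx idx

-- ===== PORT B =====
-- cost of raising everything in [m, idx] to target
def costB (array prefix_ : List Int) (idx target : Int) (m : Int) : Int :=
  (idx - m + 1) * target -
    ((PySem.List.pyGet? prefix_ idx).getD 0 - (PySem.List.pyGet? prefix_ m).getD 0
      + (PySem.List.pyGet? array m).getD 0)

-- recursive descent: leftmost midpoint on the binary-search path whose cost fits in k
def descend (array prefix_ : List Int) (idx target k : Int) (lo hi : Int) : Option Int :=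
  if _h : lo > hi then none
  else
    have hle : lo ≤ hi := Int.not_lt.mp _h
    let m := PySem.Int.floordiv (lo + hi) 2
    if costB array prefix_ idx target m > k then
      descend array prefix_ idx target k (m + 1) hi
    else
      match descend array prefix_ idx target k lo (m - 1) with
      | none => some m
      | some r => some r
termination_by (hi - lo + 1).toNat
decreasing_by
  · exact pvMidDecRight hle
  · exact pvMidDecLeft hle

def check_alt (array : List Int) (prefix_ : List Int) (idx : Int) (k : Int) : Int :=
  let target := (PySem.List.pyGet? array idx).getD 0
  let best := (descend array prefix_ idx target k 0 idx).getD idx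
  idx - best + 1

-- ===== PRECONDITION & SPEC =====
-- exactly the inputs on which Python A returns (no IndexError): array[idx] exists, and for
-- nonnegative idx the loop also reads prefix[idx] (and prefix[middle], array[middle], 0 ≤ middle ≤ idx)
def Pre_check (array : List Int) (prefix_ : List Int) (idx : Int) (k : Int) : Prop :=
  (idx < 0 ∧ -idx ≤ array.length) ∨ (0 ≤ idx ∧ idx < array.length ∧ idx < prefix_.length)
instance (array : List Int) (prefix_ : List Int) (idx : Int) (k : Int) : Decidable (Pre_check array prefix_ idx k) := by unfold Pre_check; infer_instance
def pvWitness_check : List Int × List Int × Int × Int := ([2, 4, 7], [0, 2, 6], 2, 5)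

def Spec_check (array : List Int) (prefix_ : List Int) (idx : Int) (k : Int) (out : Int) : Prop := out = check_alt array prefix_ idx k
instance (array : List Int) (prefix_ : List Int) (idx : Int) (k : Int) (out : Int) : Decidable (Spec_check array prefix_ idx k out) := by unfold Spec_check; infer_instance

-- ===== CLAIM (what is proved, stated in full; the proofs are below) =====
def Claim_equal_check : Prop := ∀ (array : List Int) (prefix_ : List Int) (idx : Int) (k : Int), Dom_check array prefix_ idx k → Pre_check array prefix_ idx k → Spec_check array prefix_ idx k (check array prefix_ idx k)

-- ===== LEMMAS AND PROOFS =====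

-- the loop with accumulator `best` computes the descent's result, defaulting to `best`
theorem checkLoop_eq_descend (array prefix_ : List Int) (idx target k : Int) :
    ∀ (n : Nat) (lo hi best : Int), (hi - lo + 1).toNat ≤ n →
      checkLoop array prefix_ idx target k lo hi best =
        idx - (descend array prefix_ idx target k lo hi).getD best + 1 := by
  intro n
  induction n with
  | zero =>
    intro lo hi best hn
    have hlh : ¬ lo ≤ hi := by omega
    rw [checkLoop, descend]
    have hgt : hi < lo := by omega
    simp [hlh, hgt]
  | succ n ih =>
    intro lo hi best hn
    rw [checkLoop, descend]
    by_cases hlh : lo ≤ hi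
    · have hb := PySem.Int.floordiv_two_mid_bounds hlh
      simp only [dif_pos hlh, dif_neg (not_lt.mpr hlh)]
      set m := PySem.Int.floordiv (lo + hi) 2 with hm
      by_cases hc : costB array prefix_ idx target m > k
      · have hcost : (idx - m + 1) * target -
            ((PySem.List.pyGet? prefix_ idx).getD 0 - (PySem.List.pyGet? prefix_ m).getD 0
              + (PySem.List.pyGet? array m).getD 0) > k := hc
        rw [if_pos hcost, if_pos hc]
        exact ih (m + 1) hi best (by omega)
      · have hcost : ¬ ((idx - m + 1) * target -
            ((PySem.List.pyGet? prefix_ idx).getD 0 - (PySem.List.pyGet? prefix_ m).getD 0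
              + (PySem.List.pyGet? array m).getD 0) > k) := hc
        rw [if_neg hcost, if_neg hc]
        rw [ih lo (m - 1) m (by omega)]
        cases descend array prefix_ idx target k lo (m - 1) <;> simp
    · have hgt : hi < lo := by omega
      simp [hlh, hgt]

-- ===== VERDICT (by name: the statement is the Claim_ definition above) =====
theorem check_spec : Claim_equal_check := by
  intro array prefix_ idx k _ _
  unfold Spec_check check check_alt
  exact checkLoop_eq_descend array prefix_ idx _ k (idx - 0 + 1).toNat 0 idx idx (le_refl _)
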